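-- pv_equiv track=rewrite | github.com/nicholemr/codeChallenges | leetCode_30/numberOfIslands.py | find_one
-- ===== SOURCE A (Python) =====
-- def find_one(grid):
--     current_row_col = [None, None]
--     for current_row, current_row_arr in enumerate(grid):
--         for col, element in enumerate(current_row_arr):
--             if element == '1':
--                 current_row_col = [current_row, col]
--                 break
--     return current_row_col
-- ===== SOURCE B (Python) =====
-- def find_one(grid):
--     for row, arr in reversed(list(enumerate(grid))):
--         for col, element in enumerate(arr):
--             if element == '1':
--                 return [row, col]
--     return [None, None]
-- ===== Notes on version B (the rewrite author's own statement) =====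
-- stated objective: alternative
-- what changed: Replaces the full forward scan that keeps overwriting a last-match accumulator with a bottom-up traversal that returns immediately at the first row containing '1' (no accumulator), which can stop early.
import Mathlib
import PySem

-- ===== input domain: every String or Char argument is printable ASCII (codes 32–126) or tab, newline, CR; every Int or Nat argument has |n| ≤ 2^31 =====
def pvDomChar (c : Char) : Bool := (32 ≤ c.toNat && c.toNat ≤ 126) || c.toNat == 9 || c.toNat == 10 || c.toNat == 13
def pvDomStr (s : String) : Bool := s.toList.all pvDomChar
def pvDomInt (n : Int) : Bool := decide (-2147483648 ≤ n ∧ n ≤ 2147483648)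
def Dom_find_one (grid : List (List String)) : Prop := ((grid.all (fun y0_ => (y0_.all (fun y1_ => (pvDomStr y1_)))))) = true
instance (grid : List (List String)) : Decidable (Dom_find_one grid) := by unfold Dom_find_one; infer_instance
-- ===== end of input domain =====

-- B replaces A's full forward scan with overwriting accumulator by a bottom-up scan with early return; alternative decomposition, same result.


-- ===== PORT A =====
-- inner 'for col, element in enumerate(arr): if element == '1': acc = [row, col]; break'
def innerA (row : Int) (acc : List (Option Int)) (cols : List (Int × String)) : List (Option Int) :=
  match cols with
  | [] => acc
  | (col, element) :: rest =>
      if element = "1" then [some row, some col] else innerA row acc rest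

def find_one (grid : List (List String)) : List (Option Int) :=
  (PySem.List.enumerate grid).foldl
    (fun acc p => innerA p.1 acc (PySem.List.enumerate p.2)) [none, none]

-- ===== PORT B =====
-- inner scan: first column holding '1', early return
def firstOneB (cols : List (Int × String)) : Option Int :=
  match cols with
  | [] => none
  | (col, element) :: rest => if element = "1" then some col else firstOneB rest

-- outer loop over reversed(list(enumerate(grid))) with early return
def goB (rows : List (Int × List String)) : List (Option Int) :=
  match rows with
  | [] => [none, none]
  | (row, arr) :: rest =>
      match firstOneB (PySem.List.enumerate arr) with
      | some col => [some row, some col]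
      | none => goB rest

def find_one_alt (grid : List (List String)) : List (Option Int) :=
  goB (PySem.List.enumerate grid).reverse

-- ===== PRECONDITION & SPEC =====
def Spec_find_one (grid : List (List String)) (out : List (Option Int)) : Prop := out = find_one_alt grid
instance (grid : List (List String)) (out : List (Option Int)) : Decidable (Spec_find_one grid out) := by unfold Spec_find_one; infer_instance

-- ===== CLAIM (what is proved, stated in full; the proofs are below) =====
def Claim_equal_find_one : Prop := ∀ (grid : List (List String)), Dom_find_one grid → Spec_find_one grid (find_one grid)

-- ===== LEMMAS AND PROOFS =====

-- goB with an arbitrary fallback (proof helper)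
def goB' (rows : List (Int × List String)) (acc : List (Option Int)) : List (Option Int) :=
  match rows with
  | [] => acc
  | (row, arr) :: rest =>
      match firstOneB (PySem.List.enumerate arr) with
      | some col => [some row, some col]
      | none => goB' rest acc

theorem goB'_default (rows : List (Int × List String)) : goB' rows [none, none] = goB rows := by
  induction rows with
  | nil => rfl
  | cons p rest ih =>
      obtain ⟨row, arr⟩ := p
      simp only [goB', goB, ih]

theorem innerA_eq (row : Int) (acc : List (Option Int)) (cols : List (Int × String)) :
    innerA row acc cols =
      match firstOneB cols with
      | some col => [some row, some col]
      | none => acc := by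
  induction cols with
  | nil => rfl
  | cons p rest ih =>
      obtain ⟨col, element⟩ := p
      by_cases h : element = "1" <;> simp only [innerA, firstOneB, h, if_pos, if_neg, ih] <;> rfl

theorem goB'_concat (xs : List (Int × List String)) (p : Int × List String)
    (acc : List (Option Int)) :
    goB' (xs ++ [p]) acc = goB' xs (innerA p.1 acc (PySem.List.enumerate p.2)) := by
  induction xs with
  | nil =>
      obtain ⟨row, arr⟩ := p
      simp only [List.nil_append, goB', innerA_eq]
  | cons q rest ih =>
      obtain ⟨row, arr⟩ := q
      simp only [List.cons_append, goB', ih]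

theorem foldl_eq_goB' (L : List (Int × List String)) (acc : List (Option Int)) :
    L.foldl (fun acc p => innerA p.1 acc (PySem.List.enumerate p.2)) acc = goB' L.reverse acc := by
  induction L generalizing acc with
  | nil => rfl
  | cons p rest ih =>
      simp only [List.foldl_cons, List.reverse_cons, ih, goB'_concat]

-- ===== VERDICT (by name: the statement is the Claim_ definition above) =====
theorem find_one_spec : Claim_equal_find_one := by
  intro grid _
  show find_one grid = find_one_alt grid
  unfold find_one find_one_alt
  rw [foldl_eq_goB', goB'_default]
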